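-- pv_equiv track=rewrite | github.com/matthew-robertson/AdventOfCode2018PY | Q18/Q18A.py | countTiles
-- ===== SOURCE A (Python) =====
-- def countTiles(grid):
-- 	lC = 0
-- 	tC = 0
-- 	for y in grid:
-- 		for x in y:
-- 			if x == '#':
-- 				lC += 1
-- 			elif x == '|':
-- 				tC += 1
-- 	return [lC, tC]
-- ===== SOURCE B (Python) =====
-- def countTiles(grid):
-- 	lC = sum(y.count('#') for y in grid)
-- 	tC = sum(y.count('|') for y in grid)
-- 	return [lC, tC]
-- ===== Notes on version B (the rewrite author's own statement) =====
-- stated objective: idiomatic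
-- what changed: Replaces the single interleaved per-element scan with two whole-grid passes built from the count primitive and sum.
import Mathlib
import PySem

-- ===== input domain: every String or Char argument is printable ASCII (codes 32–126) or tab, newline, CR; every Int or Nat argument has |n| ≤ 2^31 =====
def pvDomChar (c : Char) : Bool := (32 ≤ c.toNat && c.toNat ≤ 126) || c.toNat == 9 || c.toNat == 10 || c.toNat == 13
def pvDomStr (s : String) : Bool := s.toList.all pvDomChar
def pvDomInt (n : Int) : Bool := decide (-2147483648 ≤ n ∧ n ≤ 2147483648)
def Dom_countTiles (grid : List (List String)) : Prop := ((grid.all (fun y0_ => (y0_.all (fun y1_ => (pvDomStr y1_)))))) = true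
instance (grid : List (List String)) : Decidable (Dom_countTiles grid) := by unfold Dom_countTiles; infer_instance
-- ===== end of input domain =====

-- B replaces A's single interleaved element-by-element scan with two whole-grid passes via the count primitive and sum (idiomatic; same cost).


-- ===== PORT A =====
def countTiles (grid : List (List String)) : List Int :=
  let st := grid.foldl (fun (acc : Int × Int) y =>
    y.foldl (fun (acc : Int × Int) x =>
      if x = "#" then (acc.1 + 1, acc.2)
      else if x = "|" then (acc.1, acc.2 + 1)
      else acc) acc) (0, 0)
  [st.1, st.2]

-- ===== PORT B =====
def countTiles_alt (grid : List (List String)) : List Int :=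
  let lC : Int := (grid.map (fun y => (PySem.List.count y "#" : Int))).sum
  let tC : Int := (grid.map (fun y => (PySem.List.count y "|" : Int))).sum
  [lC, tC]

-- ===== PRECONDITION & SPEC =====
def Spec_countTiles (grid : List (List String)) (out : List Int) : Prop := out = countTiles_alt grid
instance (grid : List (List String)) (out : List Int) : Decidable (Spec_countTiles grid out) := by unfold Spec_countTiles; infer_instance

-- ===== CLAIM (what is proved, stated in full; the proofs are below) =====
def Claim_equal_countTiles : Prop := ∀ (grid : List (List String)), Dom_countTiles grid → Spec_countTiles grid (countTiles grid)

-- ===== LEMMAS AND PROOFS =====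

theorem countTiles_inner (a b : Int) (y : List String) :
    y.foldl (fun (acc : Int × Int) x =>
      if x = "#" then (acc.1 + 1, acc.2)
      else if x = "|" then (acc.1, acc.2 + 1)
      else acc) (a, b)
    = (a + (PySem.List.count y "#" : Int), b + (PySem.List.count y "|" : Int)) := by
  induction y generalizing a b with
  | nil => simp [PySem.List.count]
  | cons x xs ih =>
    simp only [List.foldl_cons]
    by_cases h1 : x = "#"
    · simp only [h1, if_pos rfl, ih, PySem.List.count, List.count_cons]
      simp
      ring
    · by_cases h2 : x = "|"
      · simp only [h1, h2, if_neg h1, if_pos rfl, ih, PySem.List.count, List.count_cons]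
        simp [h1]
        ring
      · simp [h1, h2, ih, PySem.List.count, List.count_cons]

theorem countTiles_loop (a b : Int) (grid : List (List String)) :
    grid.foldl (fun (acc : Int × Int) y =>
      y.foldl (fun (acc : Int × Int) x =>
        if x = "#" then (acc.1 + 1, acc.2)
        else if x = "|" then (acc.1, acc.2 + 1)
        else acc) acc) (a, b)
    = (a + (grid.map (fun y => (PySem.List.count y "#" : Int))).sum,
       b + (grid.map (fun y => (PySem.List.count y "|" : Int))).sum) := by
  induction grid generalizing a b with
  | nil => simp
  | cons y ys ih =>
    simp only [List.foldl_cons, countTiles_inner, ih, List.map_cons, List.sum_cons]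
    ring_nf


-- ===== VERDICT (by name: the statement is the Claim_ definition above) =====
theorem countTiles_spec : Claim_equal_countTiles := by
  intro grid _
  unfold Spec_countTiles countTiles countTiles_alt
  simp only []
  rw [countTiles_loop 0 0 grid]
  simp
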